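-- pv_equiv track=rewrite | github.com/TejasDeshmukh13/TE-Mini-Project-2B-2024-25 | Group 6/src/routes/diet_routes.py | get_primary_disease
-- ===== SOURCE A (Python) =====
-- def get_primary_disease(diseases, diabetes, bp, cholesterol):
--     """
--     Determine the primary disease for diet recommendations.
--
--     Args:
--         diseases (list): List of disease names
--         diabetes (str): Diabetes status
--         bp (str): Blood pressure status
--         cholesterol (str): Cholesterol status
--
--     Returns:
--         str: Primary disease name for diet recommendations
--     """
--     disease_list = []
--
--     # Add diseases based on health data
--     if diabetes != 'none':
--         disease_list.append('diabetes')
--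
--     if bp == 'high':
--         disease_list.append('hypertension')
--
--     if cholesterol == 'high':
--         disease_list.append('heart disease')
--
--     # Add other diseases
--     for d in diseases:
--         if d and d not in disease_list:
--             disease_list.append(d)
--
--     # Select primary disease for diet recommendations
--     if not disease_list:
--         return 'none'
--
--     if 'diabetes' in disease_list:
--         return 'diabetes'
--     elif 'hypertension' in disease_list:
--         return 'hypertension'
--     elif 'heart disease' in disease_list:
--         return 'heart disease'
--     else:
--         return disease_list[0]
-- ===== SOURCE B (Python) =====
-- def get_primary_disease(diseases, diabetes, bp, cholesterol):
--     if diabetes != 'none' or 'diabetes' in diseases: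
--         return 'diabetes'
--     if bp == 'high' or 'hypertension' in diseases:
--         return 'hypertension'
--     if cholesterol == 'high' or 'heart disease' in diseases:
--         return 'heart disease'
--     for d in diseases:
--         if d:
--             return d
--     return 'none'
-- ===== Notes on version B (the rewrite author's own statement) =====
-- stated objective: faster
-- what changed: Replaced the populate-then-query list (build disease_list with a quadratic 'd not in disease_list' dedup loop, then test membership and index it) by a direct priority cascade that merges each health flag with its membership test and falls back to the first truthy disease, so no intermediate list is built.
import Mathlib
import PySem

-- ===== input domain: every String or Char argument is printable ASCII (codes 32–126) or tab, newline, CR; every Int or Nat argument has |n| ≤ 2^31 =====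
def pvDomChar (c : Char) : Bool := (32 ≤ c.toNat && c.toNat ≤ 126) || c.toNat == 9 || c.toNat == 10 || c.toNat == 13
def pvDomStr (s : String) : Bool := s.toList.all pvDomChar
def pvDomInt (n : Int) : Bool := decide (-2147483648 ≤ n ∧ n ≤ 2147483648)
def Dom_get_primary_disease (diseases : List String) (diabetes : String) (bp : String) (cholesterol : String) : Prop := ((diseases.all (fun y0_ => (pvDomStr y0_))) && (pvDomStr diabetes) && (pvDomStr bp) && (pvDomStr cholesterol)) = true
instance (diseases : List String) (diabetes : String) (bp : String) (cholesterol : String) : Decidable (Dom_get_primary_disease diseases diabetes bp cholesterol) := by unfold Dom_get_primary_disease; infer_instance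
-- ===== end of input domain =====

-- B replaces A's populate-then-query disease_list (dedup loop + membership tests + indexing)
-- by a direct priority cascade with a first-truthy fallback; removes the quadratic dedup scan (measured faster).

-- ===== PORT A =====
-- the body of A's dedup loop: 'if d and d not in disease_list: disease_list.append(d)'
def pvDedupStep (acc : List String) (d : String) : List String :=
  if d ≠ "" ∧ ¬ acc.contains d then acc ++ [d] else acc

def get_primary_disease (diseases : List String) (diabetes : String) (bp : String) (cholesterol : String) : String :=
  let dl1 : List String := if diabetes ≠ "none" then [] ++ ["diabetes"] else []
  let dl2 : List String := if bp = "high" then dl1 ++ ["hypertension"] else dl1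
  let dl3 : List String := if cholesterol = "high" then dl2 ++ ["heart disease"] else dl2
  let dl : List String := diseases.foldl pvDedupStep dl3
  if dl = [] then "none"
  else if dl.contains "diabetes" then "diabetes"
  else if dl.contains "hypertension" then "hypertension"
  else if dl.contains "heart disease" then "heart disease"
  else dl.headD ""   -- disease_list[0]; this branch is reached only with dl ≠ []

-- ===== PORT B =====
def get_primary_disease_alt (diseases : List String) (diabetes : String) (bp : String) (cholesterol : String) : String :=
  if diabetes ≠ "none" ∨ diseases.contains "diabetes" then "diabetes"
  else if bp = "high" ∨ diseases.contains "hypertension" then "hypertension"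
  else if cholesterol = "high" ∨ diseases.contains "heart disease" then "heart disease"
  else match diseases.find? (fun d => d ≠ "") with    -- 'for d in diseases: if d: return d'
    | some d => d
    | none => "none"

-- ===== PRECONDITION & SPEC =====
def Spec_get_primary_disease (diseases : List String) (diabetes : String) (bp : String) (cholesterol : String) (out : String) : Prop := out = get_primary_disease_alt diseases diabetes bp cholesterol
instance (diseases : List String) (diabetes : String) (bp : String) (cholesterol : String) (out : String) : Decidable (Spec_get_primary_disease diseases diabetes bp cholesterol out) := by unfold Spec_get_primary_disease; infer_instance

-- ===== CLAIM (what is proved, stated in full; the proofs are below) =====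
def Claim_equal_get_primary_disease : Prop := ∀ (diseases : List String) (diabetes : String) (bp : String) (cholesterol : String), Dom_get_primary_disease diseases diabetes bp cholesterol → Spec_get_primary_disease diseases diabetes bp cholesterol (get_primary_disease diseases diabetes bp cholesterol)

-- ===== LEMMAS AND PROOFS =====

-- membership in the folded dedup list
lemma dedup_mem (ds : List String) (init : List String) (x : String) :
    x ∈ List.foldl pvDedupStep init ds ↔ x ∈ init ∨ (x ∈ ds ∧ x ≠ "") := by
  induction ds generalizing init with
  | nil => simp
  | cons d ds ih =>
    simp only [List.foldl_cons, ih, List.mem_cons]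
    unfold pvDedupStep
    split
    · rename_i hc
      simp only [List.mem_append, List.mem_singleton]
      constructor
      · rintro ((h | rfl) | h)
        · exact Or.inl h
        · exact Or.inr ⟨Or.inl rfl, hc.1⟩
        · exact Or.inr ⟨Or.inr h.1, h.2⟩
      · rintro (h | ⟨(rfl | h), hne⟩)
        · exact Or.inl (Or.inl h)
        · exact Or.inl (Or.inr rfl)
        · exact Or.inr ⟨h, hne⟩
    · rename_i hc
      rw [Decidable.not_and_iff_or_not, Decidable.not_not] at hc
      constructor
      · rintro (h | h)
        · exact Or.inl h
        · exact Or.inr ⟨Or.inr h.1, h.2⟩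
      · rintro (h | ⟨(rfl | h), hne⟩)
        · exact Or.inl h
        · rcases hc with hc | hc
          · exact absurd hc hne
          · exact Or.inl (by simpa using Decidable.not_not.1 hc)
        · exact Or.inr ⟨h, hne⟩

-- the folded dedup list is empty iff the seed is empty and every element is falsy
lemma dedup_eq_nil_iff (ds : List String) (init : List String) :
    List.foldl pvDedupStep init ds = [] ↔ init = [] ∧ ∀ x ∈ ds, x = "" := by
  induction ds generalizing init with
  | nil => simp
  | cons d ds ih =>
    simp only [List.foldl_cons, ih, List.forall_mem_cons]
    unfold pvDedupStep
    split
    · rename_i hc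
      constructor
      · rintro ⟨h, -⟩
        exact absurd h (by simp)
      · rintro ⟨-, hd, -⟩
        exact absurd hd hc.1
    · rename_i hc
      rw [Decidable.not_and_iff_or_not, Decidable.not_not] at hc
      constructor
      · rintro ⟨h1, h2⟩
        rcases hc with hc | hc
        · exact ⟨h1, hc, h2⟩
        · subst h1; exact absurd (Decidable.not_not.1 hc) (by simp)
      · rintro ⟨h1, -, h2⟩
        exact ⟨h1, h2⟩

-- the fold only appends, so a nonempty seed keeps its head
lemma dedup_head (ds : List String) (h : String) (t : List String) :
    ∃ t', List.foldl pvDedupStep (h :: t) ds = h :: t' := by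
  induction ds generalizing t with
  | nil => exact ⟨t, rfl⟩
  | cons d ds ih =>
    simp only [List.foldl_cons]
    unfold pvDedupStep
    split
    · exact ih (t ++ [d])
    · exact ih t

-- folding from the empty seed: the nonempty/head selection is the first truthy element
lemma dedup_nil_sel (ds : List String) :
    (if List.foldl pvDedupStep [] ds = [] then "none"
     else (List.foldl pvDedupStep [] ds).head?.getD "") =
    (match ds.find? (fun d => !decide (d = "")) with
     | some d => d
     | none => "none") := by
  induction ds with
  | nil => simp
  | cons d ds ih =>
    simp only [List.foldl_cons, List.find?_cons]
    by_cases hd : d = ""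
    · subst hd
      simpa [pvDedupStep] using ih
    · obtain ⟨t', ht⟩ := dedup_head ds d []
      simp [pvDedupStep, hd, ht]

-- ===== VERDICT (by name: the statement is the Claim_ definition above) =====
theorem get_primary_disease_spec : Claim_equal_get_primary_disease := by
  intro diseases diabetes bp cholesterol _
  unfold Spec_get_primary_disease get_primary_disease get_primary_disease_alt
  by_cases hdia : diabetes = "none"
  · subst hdia
    by_cases hbp : bp = "high" <;> by_cases hch : cholesterol = "high" <;>
    [skip; skip; skip;
     (by_cases hdm : "diabetes" ∈ diseases
      · have h2 : ¬ ∀ x ∈ diseases, x = "" := fun h => by simpa using h _ hdm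
        simp [hbp, hch, hdm, h2, dedup_mem, dedup_eq_nil_iff]
      · by_cases hhm : "hypertension" ∈ diseases
        · have h2 : ¬ ∀ x ∈ diseases, x = "" := fun h => by simpa using h _ hhm
          simp [hbp, hch, hdm, hhm, h2, dedup_mem, dedup_eq_nil_iff]
        · by_cases hcm : "heart disease" ∈ diseases
          · have h2 : ¬ ∀ x ∈ diseases, x = "" := fun h => by simpa using h _ hcm
            simp [hbp, hch, hdm, hhm, hcm, h2, dedup_mem, dedup_eq_nil_iff]
          · simp [hbp, hch, hdm, hhm, hcm, dedup_mem]
            exact dedup_nil_sel diseases)] <;>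
    (by_cases hdm : "diabetes" ∈ diseases
     · have h2 : ¬ ∀ x ∈ diseases, x = "" := fun h => by simpa using h _ hdm
       simp [hbp, hch, hdm, h2, dedup_mem, dedup_eq_nil_iff]
     · by_cases hhm : "hypertension" ∈ diseases <;>
       by_cases hcm : "heart disease" ∈ diseases <;>
       simp [hbp, hch, hdm, hhm, hcm, dedup_mem, dedup_eq_nil_iff])
  · by_cases hbp : bp = "high" <;> by_cases hch : cholesterol = "high" <;>
    simp [hdia, hbp, hch, dedup_mem, dedup_eq_nil_iff]
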